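-- pv_equiv track=rewrite | github.com/Vlad-Savch/Algorithm_Lab | Lab6/Task4/src/task_associative_array.py | process_operations
-- ===== SOURCE A (Python) =====
-- def process_operations(operations):
--     values = {}
--     order = []
--     result = []
--
--     for operation in operations:
--         parts = operation.split()
--         command = parts[0]
--
--         if command == "put":
--             key, value = parts[1], parts[2]
--             if key not in values:
--                 order.append(key)
--             values[key] = value
--
--         elif command == "get":
--             key = parts[1]
--             result.append(values.get(key, "<none>"))
--
--         elif command == "prev":
--             key = parts[1]
--             if key not in values:
--                 result.append("<none>")
--             else:
--                 index = order.index(key)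
--                 if index == 0:
--                     result.append("<none>")
--                 else:
--                     result.append(values[order[index - 1]])
--
--         elif command == "next":
--             key = parts[1]
--             if key not in values:
--                 result.append("<none>")
--             else:
--                 index = order.index(key)
--                 if index == len(order) - 1:
--                     result.append("<none>")
--                 else:
--                     result.append(values[order[index + 1]])
--
--         elif command == "delete":
--             key = parts[1]
--             if key in values:
--                 del values[key]
--                 order.remove(key)
--
--     return result
-- ===== SOURCE B (Python) =====
-- def process_operations(operations):
--     vals = {}
--     prv = {}
--     nxt = {}
--     head = None
--     tail = None
--     result = []
--     for operation in operations:
--         parts = operation.split()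
--         command = parts[0]
--         if command == "put":
--             key, value = parts[1], parts[2]
--             if key not in vals:
--                 prv[key] = tail
--                 nxt[key] = None
--                 if tail is None:
--                     head = key
--                 else:
--                     nxt[tail] = key
--                 tail = key
--             vals[key] = value
--         elif command == "get":
--             result.append(vals.get(parts[1], "<none>"))
--         elif command == "prev":
--             key = parts[1]
--             if key not in vals:
--                 result.append("<none>")
--             else:
--                 p = prv[key]
--                 result.append("<none>" if p is None else vals[p])
--         elif command == "next":
--             key = parts[1]
--             if key not in vals:
--                 result.append("<none>")
--             else:
--                 n = nxt[key]
--                 result.append("<none>" if n is None else vals[n])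
--         elif command == "delete":
--             key = parts[1]
--             if key in vals:
--                 p = prv.pop(key)
--                 n = nxt.pop(key)
--                 if p is None:
--                     head = n
--                 else:
--                     nxt[p] = n
--                 if n is None:
--                     tail = p
--                 else:
--                     prv[n] = p
--                 del vals[key]
--     return result
-- ===== Notes on version B (the rewrite author's own statement) =====
-- stated objective: alternative
-- what changed: Replaced A's insertion-order list with its order.index/order.remove/membership scans per operation by a doubly-linked list of keys stored in two dicts (prev/next pointers) plus head/tail variables, so neighbour queries and deletes become direct pointer lookups instead of positional scans.
import Mathlib
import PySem

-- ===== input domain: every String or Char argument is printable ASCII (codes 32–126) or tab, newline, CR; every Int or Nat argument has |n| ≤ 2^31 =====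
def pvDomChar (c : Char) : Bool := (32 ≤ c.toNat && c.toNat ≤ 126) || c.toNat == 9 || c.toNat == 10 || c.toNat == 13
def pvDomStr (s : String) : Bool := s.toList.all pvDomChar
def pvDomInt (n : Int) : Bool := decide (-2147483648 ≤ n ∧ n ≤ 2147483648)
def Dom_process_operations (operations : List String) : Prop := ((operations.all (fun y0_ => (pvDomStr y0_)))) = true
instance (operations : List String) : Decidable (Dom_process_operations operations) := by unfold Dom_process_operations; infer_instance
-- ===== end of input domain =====

-- B replaces A's insertion-order list (with its positional index/remove scans per query) by a
-- doubly-linked list of keys kept in two dicts (prev/next pointers) with head/tail variables, so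
-- neighbour queries and deletes become direct pointer lookups; equivalence of the returned list is
-- proved on all well-formed operation sequences (Pre_ excludes only inputs where the Python A
-- raises IndexError on a malformed operation string).

-- ===== PORT A =====
-- one loop iteration of A over (values, order, result)
def stepA (st : PySem.Dict String String × List String × List String) (operation : String) :
    PySem.Dict String String × List String × List String :=
  let values := st.1
  let order := st.2.1
  let result := st.2.2
  let parts := PySem.Str.split₀ operation
  let command := (PySem.List.pyGet? parts 0).getD ""   -- parts[0]; none (IndexError) excluded by Pre_
  if command = "put" then
    let key := (PySem.List.pyGet? parts 1).getD ""
    let value := (PySem.List.pyGet? parts 2).getD ""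
    let order := if values.contains key then order else order ++ [key]
    (values.insert key value, order, result)
  else if command = "get" then
    let key := (PySem.List.pyGet? parts 1).getD ""
    (values, order, result ++ [values.getD key "<none>"])
  else if command = "prev" then
    let key := (PySem.List.pyGet? parts 1).getD ""
    if values.contains key then
      let index := (PySem.List.index? order key).getD 0   -- order.index(key); key ∈ order in every reachable state
      if index = 0 then (values, order, result ++ ["<none>"])
      else (values, order,
        result ++ [values.getD ((PySem.List.pyGet? order ((index : Int) - 1)).getD "") ""])
        -- values[order[index-1]]: both lookups always succeed in reachable states, defaults unreachable
    else (values, order, result ++ ["<none>"])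
  else if command = "next" then
    let key := (PySem.List.pyGet? parts 1).getD ""
    if values.contains key then
      let index := (PySem.List.index? order key).getD 0
      if (index : Int) = (order.length : Int) - 1 then (values, order, result ++ ["<none>"])
      else (values, order,
        result ++ [values.getD ((PySem.List.pyGet? order ((index : Int) + 1)).getD "") ""])
    else (values, order, result ++ ["<none>"])
  else if command = "delete" then
    let key := (PySem.List.pyGet? parts 1).getD ""
    if values.contains key then
      (values.erase key, (PySem.List.remove? order key).getD order, result)
    else (values, order, result)
  else (values, order, result)

def process_operations (operations : List String) : List String :=
  (operations.foldl stepA (PySem.Dict.empty, [], [])).2.2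

-- ===== PORT B =====
-- one loop iteration of B over (vals, prv, nxt, head, tail, result); prv/nxt hold the doubly-linked list
def stepB
    (st : PySem.Dict String String × PySem.Dict String (Option String) ×
          PySem.Dict String (Option String) × Option String × Option String × List String)
    (operation : String) :
    PySem.Dict String String × PySem.Dict String (Option String) ×
    PySem.Dict String (Option String) × Option String × Option String × List String :=
  let vals := st.1
  let prv := st.2.1
  let nxt := st.2.2.1
  let head := st.2.2.2.1
  let tail := st.2.2.2.2.1
  let result := st.2.2.2.2.2
  let parts := PySem.Str.split₀ operation
  let command := (PySem.List.pyGet? parts 0).getD ""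
  if command = "put" then
    let key := (PySem.List.pyGet? parts 1).getD ""
    let value := (PySem.List.pyGet? parts 2).getD ""
    if vals.contains key then (vals.insert key value, prv, nxt, head, tail, result)
    else
      let prv := prv.insert key tail
      let nxt := nxt.insert key none
      match tail with
      | none => (vals.insert key value, prv, nxt, some key, some key, result)
      | some t => (vals.insert key value, prv, nxt.insert t (some key), head, some key, result)
  else if command = "get" then
    let key := (PySem.List.pyGet? parts 1).getD ""
    (vals, prv, nxt, head, tail, result ++ [vals.getD key "<none>"])
  else if command = "prev" then
    let key := (PySem.List.pyGet? parts 1).getD ""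
    if vals.contains key then
      match prv.getD key none with   -- prv[key]; present in every reachable state
      | none => (vals, prv, nxt, head, tail, result ++ ["<none>"])
      | some q => (vals, prv, nxt, head, tail, result ++ [vals.getD q ""])
    else (vals, prv, nxt, head, tail, result ++ ["<none>"])
  else if command = "next" then
    let key := (PySem.List.pyGet? parts 1).getD ""
    if vals.contains key then
      match nxt.getD key none with
      | none => (vals, prv, nxt, head, tail, result ++ ["<none>"])
      | some q => (vals, prv, nxt, head, tail, result ++ [vals.getD q ""])
    else (vals, prv, nxt, head, tail, result ++ ["<none>"])
  else if command = "delete" then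
    let key := (PySem.List.pyGet? parts 1).getD ""
    if vals.contains key then
      let p := prv.getD key none    -- prv.pop(key)
      let n := nxt.getD key none    -- nxt.pop(key)
      let prv := prv.erase key
      let nxt := nxt.erase key
      let hn : Option String × PySem.Dict String (Option String) :=
        match p with
        | none => (n, nxt)
        | some pp => (head, nxt.insert pp n)
      let tp : Option String × PySem.Dict String (Option String) :=
        match n with
        | none => (p, prv)
        | some nn => (tail, prv.insert nn p)
      (vals.erase key, tp.2, hn.2, hn.1, tp.1, result)
    else (vals, prv, nxt, head, tail, result)
  else (vals, prv, nxt, head, tail, result)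

def process_operations_alt (operations : List String) : List String :=
  (operations.foldl stepB (PySem.Dict.empty, PySem.Dict.empty, PySem.Dict.empty, none, none, [])).2.2.2.2.2

-- ===== PRECONDITION & SPEC =====
-- Pre_ excludes exactly the operation strings on which the Python A raises IndexError:
-- an operation with no tokens (parts[0]), a "put" with fewer than 3 tokens, or a
-- "get"/"prev"/"next"/"delete" with fewer than 2 tokens.
def Pre_process_operations (operations : List String) : Prop :=
  ∀ op ∈ operations,
    let parts := PySem.Str.split₀ op
    parts ≠ [] ∧
    (parts.headD "" = "put" → 3 ≤ parts.length) ∧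
    ((parts.headD "" = "get" ∨ parts.headD "" = "prev" ∨ parts.headD "" = "next" ∨
      parts.headD "" = "delete") → 2 ≤ parts.length)
instance (operations : List String) : Decidable (Pre_process_operations operations) := by
  unfold Pre_process_operations; infer_instance

def pvWitness_process_operations : List String :=
  ["put a 1", "put b 2", "prev b", "next a", "delete a", "get b"]

def Spec_process_operations (operations : List String) (out : List String) : Prop :=
  out = process_operations_alt operations
instance (operations : List String) (out : List String) :
    Decidable (Spec_process_operations operations out) := by
  unfold Spec_process_operations; infer_instance

-- ===== CLAIM (what is proved, stated in full; the proofs are below) =====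
def Claim_equal_process_operations : Prop :=
  ∀ (operations : List String), Dom_process_operations operations →
    Pre_process_operations operations →
    Spec_process_operations operations (process_operations operations)

-- ===== LEMMAS AND PROOFS =====

-- the key directly before / after k in the insertion-order list
def prevOf : List String → String → Option String
  | [], _ => none
  | a :: t, k => if t.head? = some k then some a else prevOf t k

def nextOf : List String → String → Option String
  | [], _ => none
  | a :: t, k => if a = k then t.head? else nextOf t k

-- ==== basic facts about prevOf / nextOf ====

lemma getLast?_cons_ne {a : String} {t : List String} (h : t ≠ []) :
    (a :: t).getLast? = t.getLast? := by
  cases t with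
  | nil => simp at h
  | cons b r => simp [List.getLast?_cons_cons]

lemma prevOf_of_not_mem {l : List String} {k : String} (h : k ∉ l) : prevOf l k = none := by
  induction l with
  | nil => rfl
  | cons a t ih =>
    simp only [List.mem_cons, not_or] at h
    have ht : t.head? ≠ some k := fun hh => h.2 (List.mem_of_mem_head? hh)
    simp [prevOf, ht, ih h.2]

lemma mem_of_prevOf_eq_some {l : List String} {k p : String} (h : prevOf l k = some p) : p ∈ l := by
  induction l with
  | nil => simp [prevOf] at h
  | cons a t ih =>
    simp only [prevOf] at h
    split at h
    · simp at h; simp [h]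
    · simp [ih h]

lemma mem_of_nextOf_eq_some {l : List String} {k p : String} (h : nextOf l k = some p) : p ∈ l := by
  induction l with
  | nil => simp [nextOf] at h
  | cons a t ih =>
    simp only [nextOf] at h
    split at h
    · simp [List.mem_of_mem_head? h]
    · simp [ih h]

lemma prevOf_eq_none_iff {l : List String} {k : String} (hnd : l.Nodup) (hk : k ∈ l) :
    prevOf l k = none ↔ l.head? = some k := by
  induction l with
  | nil => simp at hk
  | cons a t ih =>
    rcases List.nodup_cons.1 hnd with ⟨ha, ht⟩
    by_cases hak : a = k
    · subst hak
      simp only [List.head?_cons]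
      have hth : t.head? ≠ some a := fun hh => ha (List.mem_of_mem_head? hh)
      simp [prevOf, hth, prevOf_of_not_mem ha]
    · have hkt : k ∈ t := by
        rcases List.mem_cons.1 hk with h | h
        · exact absurd h.symm hak
        · exact h
      simp only [prevOf, List.head?_cons]
      by_cases hh : t.head? = some k
      · simp [hh, hak]
      · simp [hh, ih ht hkt, hak]

lemma nextOf_eq_none_iff {l : List String} {k : String} (hnd : l.Nodup) (hk : k ∈ l) :
    nextOf l k = none ↔ l.getLast? = some k := by
  induction l with
  | nil => simp at hk
  | cons a t ih =>
    rcases List.nodup_cons.1 hnd with ⟨ha, ht⟩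
    by_cases hak : a = k
    · subst hak
      simp only [nextOf, reduceIte]
      cases t with
      | nil => simp
      | cons b r =>
        simp only [List.head?_cons, List.getLast?_cons_cons]
        constructor
        · intro h; simp at h
        · intro h
          exact absurd (List.mem_of_getLast? (l := b :: r) h) ha
    · have hkt : k ∈ t := by
        rcases List.mem_cons.1 hk with h | h
        · exact absurd h.symm hak
        · exact h
      have htne : t ≠ [] := by intro h; rw [h] at hkt; simp at hkt
      simp only [nextOf, hak, if_false]
      rw [ih ht hkt, getLast?_cons_ne htne]

lemma prevOf_split {pre suf : List String} {k : String} (h1 : k ∉ pre) (h2 : k ∉ suf) :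
    prevOf (pre ++ k :: suf) k = pre.getLast? := by
  induction pre with
  | nil =>
    have hth : suf.head? ≠ some k := fun hh => h2 (List.mem_of_mem_head? hh)
    simp [prevOf, hth, prevOf_of_not_mem h2]
  | cons a pre ih =>
    simp only [List.mem_cons, not_or] at h1
    cases pre with
    | nil => simp [prevOf]
    | cons b pre' =>
      have hbk : ((b :: pre') ++ k :: suf).head? ≠ some k := by
        simp only [List.cons_append, List.head?_cons]
        simp
        intro h; exact h1.2 (by simp [h])
      have hunf : prevOf ((a :: b :: pre') ++ k :: suf) k =
          prevOf ((b :: pre') ++ k :: suf) k := by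
        simp only [List.cons_append, prevOf]
        rw [if_neg (by simpa using hbk)]
      rw [hunf, ih h1.2, List.getLast?_cons_cons]

lemma nextOf_split {pre suf : List String} {k : String} (h1 : k ∉ pre) :
    nextOf (pre ++ k :: suf) k = suf.head? := by
  induction pre with
  | nil => simp [nextOf]
  | cons a pre ih =>
    simp only [List.mem_cons, not_or] at h1
    simp [nextOf, Ne.symm h1.1, ih h1.2]

-- ==== appending a fresh key at the end ====

lemma prevOf_append_of_ne {l : List String} {j k : String} (hjk : j ≠ k) :
    prevOf (l ++ [k]) j = prevOf l j := by
  induction l with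
  | nil =>
    simp only [List.nil_append, prevOf]
    rw [if_neg (by simp)]
  | cons a t ih =>
    have hiff : ((t ++ [k]).head? = some j) ↔ (t.head? = some j) := by
      cases t with
      | nil => simp [Ne.symm hjk]
      | cons b r => simp
    simp only [List.cons_append, prevOf]
    rw [ih]
    by_cases hh : t.head? = some j
    · rw [if_pos (hiff.2 hh), if_pos hh]
    · rw [if_neg (fun h => hh (hiff.1 h)), if_neg hh]

lemma prevOf_append_self {l : List String} {k : String} (h : k ∉ l) :
    prevOf (l ++ [k]) k = l.getLast? := by
  have := prevOf_split (pre := l) (suf := []) (k := k) h (by simp)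
  simpa using this

lemma nextOf_append_self {l : List String} {k : String} (h : k ∉ l) :
    nextOf (l ++ [k]) k = none := by
  have := nextOf_split (pre := l) (suf := []) (k := k) h
  simpa using this

lemma nextOf_append_mem {l : List String} {j k : String} (hnd : l.Nodup) (hj : j ∈ l) :
    nextOf (l ++ [k]) j = if l.getLast? = some j then some k else nextOf l j := by
  induction l with
  | nil => simp at hj
  | cons a t ih =>
    rcases List.nodup_cons.1 hnd with ⟨ha, ht⟩
    by_cases haj : a = j
    · subst haj
      cases t with
      | nil => simp [nextOf]
      | cons b r =>
        have hne : (b :: r).getLast? ≠ some a := fun hh => ha (List.mem_of_getLast? hh)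
        simp only [List.cons_append, nextOf, reduceIte, List.getLast?_cons_cons, if_neg hne]
        simp
    · have hjt : j ∈ t := by
        rcases List.mem_cons.1 hj with h | h
        · exact absurd h.symm haj
        · exact h
      have htne : t ≠ [] := by intro h; rw [h] at hjt; simp at hjt
      simp only [List.cons_append, nextOf, haj, if_false]
      rw [ih ht hjt, getLast?_cons_ne htne]

-- ==== adjacency is symmetric ====

lemma nextOf_eq_some_iff_prevOf {l : List String} {j k : String} (hnd : l.Nodup) :
    nextOf l k = some j ↔ prevOf l j = some k := by
  induction l with
  | nil => simp [nextOf, prevOf]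
  | cons a t ih =>
    rcases List.nodup_cons.1 hnd with ⟨ha, ht⟩
    simp only [nextOf, prevOf]
    by_cases hak : a = k
    · subst hak
      rw [if_pos rfl]
      constructor
      · intro hh
        rw [if_pos hh]
      · intro hh
        by_cases hjh : t.head? = some j
        · exact hjh
        · rw [if_neg hjh] at hh
          exact absurd (mem_of_prevOf_eq_some hh) ha
    · rw [if_neg hak]
      by_cases hjh : t.head? = some j
      · rw [if_pos hjh]
        constructor
        · intro hh
          have hjm : j ∈ t := List.mem_of_mem_head? hjh
          have hpt : prevOf t j = none := prevOf_eq_none_iff ht hjm |>.2 hjh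
          rw [ih ht] at hh
          rw [hh] at hpt; simp at hpt
        · intro hh
          simp only [Option.some_inj] at hh
          exact absurd hh hak
      · rw [if_neg hjh, ih ht]

-- ==== erasing a key ====

lemma head?_erase {l : List String} {k : String} (hk : k ∈ l) :
    (l.erase k).head? = if l.head? = some k then nextOf l k else l.head? := by
  cases l with
  | nil => simp at hk
  | cons a t =>
    by_cases hak : a = k
    · subst hak
      simp [List.erase_cons_head, nextOf]
    · rw [List.erase_cons_tail (by simp [hak])]
      simp [hak]

lemma getLast?_erase {l : List String} {k : String} (hnd : l.Nodup) (hk : k ∈ l) :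
    (l.erase k).getLast? = if l.getLast? = some k then prevOf l k else l.getLast? := by
  induction l with
  | nil => simp at hk
  | cons a t ih =>
    rcases List.nodup_cons.1 hnd with ⟨ha, ht⟩
    by_cases hak : a = k
    · subst hak
      rw [List.erase_cons_head]
      cases t with
      | nil => simp [prevOf]
      | cons b r =>
        have hne : (b :: r).getLast? ≠ some a := fun hh => ha (List.mem_of_getLast? hh)
        simp [List.getLast?_cons_cons, hne]
    · have hkt : k ∈ t := by
        rcases List.mem_cons.1 hk with h | h
        · exact absurd h.symm hak
        · exact h
      have htne : t ≠ [] := by intro h; rw [h] at hkt; simp at hkt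
      rw [List.erase_cons_tail (by simp [hak])]
      by_cases hte : t.erase k = []
      · have ht1 : t = [k] := by
          cases t with
          | nil => simp at hkt
          | cons b r =>
            by_cases hbk : b = k
            · subst hbk
              rw [List.erase_cons_head] at hte
              simp [hte]
            · rw [List.erase_cons_tail (by simp [hbk])] at hte
              simp at hte
        subst ht1
        simp [prevOf]
      · rw [getLast?_cons_ne hte, ih ht hkt, getLast?_cons_ne htne]
        by_cases hl : t.getLast? = some k
        · rw [if_pos hl, if_pos hl]
          have hth : t.head? ≠ some k := by
            intro hh
            cases t with
            | nil => simp at hkt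
            | cons b r =>
              have hbk : b = k := by simpa using hh
              subst hbk
              rcases List.nodup_cons.1 ht with ⟨hb, hr⟩
              cases r with
              | nil => simp at hte
              | cons c s =>
                rw [List.getLast?_cons_cons] at hl
                exact hb (List.mem_of_getLast? hl)
          simp [prevOf, hth]
        · rw [if_neg hl, if_neg hl]

lemma prevOf_erase {l : List String} {j k : String} (hnd : l.Nodup) (hk : k ∈ l) (hj : j ∈ l)
    (hjk : j ≠ k) :
    prevOf (l.erase k) j = if prevOf l j = some k then prevOf l k else prevOf l j := by
  induction l with
  | nil => simp at hk
  | cons a t ih =>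
    rcases List.nodup_cons.1 hnd with ⟨ha, ht⟩
    by_cases hak : a = k
    · subst hak
      rw [List.erase_cons_head]
      have hjt : j ∈ t := by
        rcases List.mem_cons.1 hj with h | h
        · exact absurd h hjk
        · exact h
      have hpa : prevOf (a :: t) a = none := by
        have hth : t.head? ≠ some a := fun hh => ha (List.mem_of_mem_head? hh)
        simp [prevOf, hth, prevOf_of_not_mem ha]
      by_cases hh : t.head? = some j
      · have h1 : prevOf (a :: t) j = some a := by simp [prevOf, hh]
        rw [h1, if_pos rfl, hpa]
        exact prevOf_eq_none_iff ht hjt |>.2 hh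
      · have h1 : prevOf (a :: t) j = prevOf t j := by simp [prevOf, hh]
        rw [h1]
        have hne : prevOf t j ≠ some a := fun hc => ha (mem_of_prevOf_eq_some hc)
        simp [hne]
    · have hkt : k ∈ t := by
        rcases List.mem_cons.1 hk with h | h
        · exact absurd h.symm hak
        · exact h
      rw [List.erase_cons_tail (by simp [hak])]
      by_cases haj : a = j
      · subst haj
        have hpj : prevOf (a :: t) a = none := by
          have hth : t.head? ≠ some a := fun hh => ha (List.mem_of_mem_head? hh)
          simp [prevOf, hth, prevOf_of_not_mem ha]
        have hnot : a ∉ t.erase k := fun hc => ha (List.mem_of_mem_erase hc)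
        have hh2 : (t.erase k).head? ≠ some a := fun hc => hnot (List.mem_of_mem_head? hc)
        rw [hpj]
        simp only [prevOf, if_neg hh2]
        rw [prevOf_of_not_mem hnot]
        simp
      · have hjt : j ∈ t := by
          rcases List.mem_cons.1 hj with h | h
          · exact absurd h.symm haj
          · exact h
        have hrec := ih ht hkt hjt
        by_cases hh : t.head? = some j
        · have hth : (t.erase k).head? = some j := by
            rw [head?_erase hkt, hh]
            have hne : some j ≠ some k := by simp [hjk]
            simp [hne]
          have h1 : prevOf (a :: t.erase k) j = some a := by simp [prevOf, hth]
          have h2 : prevOf (a :: t) j = some a := by simp [prevOf, hh]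
          rw [h1, h2]
          have hne : some a ≠ some k := by simp [hak]
          simp [hne]
        · by_cases hth : (t.erase k).head? = some j
          · have htk : t.head? = some k := by
              rw [head?_erase hkt] at hth
              by_cases hc : t.head? = some k
              · exact hc
              · rw [if_neg hc] at hth; exact absurd hth hh
            have hpj : prevOf t j = some k := by
              rw [← nextOf_eq_some_iff_prevOf ht]
              cases t with
              | nil => simp at hkt
              | cons b r =>
                have hbk : b = k := by simpa using htk
                subst hbk
                rw [List.erase_cons_head] at hth
                simp [nextOf, hth]
            have h2 : prevOf (a :: t) j = some k := by simp [prevOf, hh, hpj]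
            have h1 : prevOf (a :: t.erase k) j = some a := by simp [prevOf, hth]
            rw [h1, h2, if_pos rfl]
            simp [prevOf, htk]
          · have h1 : prevOf (a :: t.erase k) j = prevOf (t.erase k) j := by
              simp [prevOf, hth]
            have h2 : prevOf (a :: t) j = prevOf t j := by simp [prevOf, hh]
            rw [h1, h2, hrec]
            by_cases hc : prevOf t j = some k
            · rw [if_pos hc, if_pos hc]
              have htk : t.head? ≠ some k := by
                intro hho
                have hnone := prevOf_eq_none_iff ht hkt |>.2 hho
                have hnx := (nextOf_eq_some_iff_prevOf ht).2 hc
                cases t with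
                | nil => simp at hkt
                | cons b r =>
                  have hbk : b = k := by simpa using hho
                  subst hbk
                  simp only [nextOf, reduceIte] at hnx
                  rw [List.erase_cons_head] at hth
                  exact hth hnx
              simp [prevOf, htk]
            · rw [if_neg hc, if_neg hc]

lemma nextOf_erase {l : List String} {j k : String} (hnd : l.Nodup) (hk : k ∈ l) (hj : j ∈ l)
    (hjk : j ≠ k) :
    nextOf (l.erase k) j = if nextOf l j = some k then nextOf l k else nextOf l j := by
  induction l with
  | nil => simp at hk
  | cons a t ih =>
    rcases List.nodup_cons.1 hnd with ⟨ha, ht⟩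
    by_cases hak : a = k
    · subst hak
      rw [List.erase_cons_head]
      have hjt : j ∈ t := by
        rcases List.mem_cons.1 hj with h | h
        · exact absurd h hjk
        · exact h
      have h2 : nextOf (a :: t) j = nextOf t j := by
        simp only [nextOf]
        rw [if_neg (fun h => hjk h.symm)]
      rw [h2]
      have hne : nextOf t j ≠ some a := fun hc => ha (mem_of_nextOf_eq_some hc)
      simp [hne]
    · have hkt : k ∈ t := by
        rcases List.mem_cons.1 hk with h | h
        · exact absurd h.symm hak
        · exact h
      rw [List.erase_cons_tail (by simp [hak])]
      by_cases haj : a = j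
      · subst haj
        have h2 : nextOf (a :: t.erase k) a = (t.erase k).head? := by simp [nextOf]
        have h3 : nextOf (a :: t) a = t.head? := by simp [nextOf]
        rw [h2, h3, head?_erase hkt]
        by_cases hh : t.head? = some k
        · rw [if_pos hh, if_pos hh]
          have h4 : nextOf (a :: t) k = nextOf t k := by simp [nextOf, hak]
          rw [h4]
        · rw [if_neg hh, if_neg hh]
      · have hjt : j ∈ t := by
          rcases List.mem_cons.1 hj with h | h
          · exact absurd h.symm haj
          · exact h
        have h2 : nextOf (a :: t.erase k) j = nextOf (t.erase k) j := by
          simp [nextOf, haj]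
        have h3 : nextOf (a :: t) j = nextOf t j := by simp [nextOf, haj]
        have h4 : nextOf (a :: t) k = nextOf t k := by simp [nextOf, hak]
        rw [h2, h3, h4, ih ht hkt hjt]

-- ==== index? characterisations used by A's prev/next branches ====

lemma index?_zero_prevOf {order : List String} {key : String} (hnd : order.Nodup)
    (hi : PySem.List.index? order key = some 0) : prevOf order key = none := by
  rw [PySem.List.index?_eq_some_iff] at hi
  obtain ⟨pre, suf, rfl, hlen, hnp⟩ := hi
  have hpe : pre = [] := List.eq_nil_of_length_eq_zero hlen
  subst hpe
  simp only [List.nil_append]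
  have hks : key ∉ suf := by
    simp [List.nodup_cons] at hnd; exact hnd.1
  have := prevOf_split (pre := []) (suf := suf) (k := key) (by simp) hks
  simpa using this

lemma index?_pos_prevOf {order : List String} {key : String} {i : ℕ} (hnd : order.Nodup)
    (hi : PySem.List.index? order key = some i) (h0 : i ≠ 0) :
    ∃ q, PySem.List.pyGet? order ((i : Int) - 1) = some q ∧ prevOf order key = some q := by
  rw [PySem.List.index?_eq_some_iff] at hi
  obtain ⟨pre, suf, rfl, hlen, hnp⟩ := hi
  have hpre : pre ≠ [] := by intro h; subst h; simp at hlen; exact h0 hlen.symm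
  have hks : key ∉ suf := by
    rw [List.nodup_append] at hnd
    have := hnd.2.1
    simp [List.nodup_cons] at this
    exact this.1
  obtain ⟨q, hq⟩ := Option.isSome_iff_exists.1 (List.getLast?_isSome.2 hpre)
  refine ⟨q, ?_, ?_⟩
  · have h1 : ((i : Int) - 1) = ((i - 1 : ℕ) : Int) := by omega
    rw [h1, PySem.List.pyGet?_natCast]
    have hlt : i - 1 < pre.length := by
      have : pre.length ≠ 0 := fun h => hpre (List.eq_nil_of_length_eq_zero h)
      omega
    rw [List.getElem?_append_left hlt]
    rw [List.getLast?_eq_getElem?] at hq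
    subst hlen
    exact hq
  · rw [prevOf_split hnp hks]
    exact hq

lemma index?_last_nextOf {order : List String} {key : String} {i : ℕ}
    (hi : PySem.List.index? order key = some i) (hl : (i : Int) = (order.length : Int) - 1) :
    nextOf order key = none := by
  rw [PySem.List.index?_eq_some_iff] at hi
  obtain ⟨pre, suf, rfl, hlen, hnp⟩ := hi
  have hs : suf = [] := by
    rw [List.length_append, List.length_cons] at hl
    have : suf.length = 0 := by omega
    exact List.eq_nil_of_length_eq_zero this
  subst hs
  rw [nextOf_split hnp]
  simp

lemma index?_mid_nextOf {order : List String} {key : String} {i : ℕ}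
    (hi : PySem.List.index? order key = some i) (hl : (i : Int) ≠ (order.length : Int) - 1) :
    ∃ q, PySem.List.pyGet? order ((i : Int) + 1) = some q ∧ nextOf order key = some q := by
  rw [PySem.List.index?_eq_some_iff] at hi
  obtain ⟨pre, suf, rfl, hlen, hnp⟩ := hi
  cases suf with
  | nil =>
    exfalso
    rw [List.length_append, List.length_cons] at hl
    simp at hl
    omega
  | cons s suf' =>
    refine ⟨s, ?_, ?_⟩
    · have h1 : ((i : Int) + 1) = ((i + 1 : ℕ) : Int) := by omega
      rw [h1, PySem.List.pyGet?_natCast]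
      subst hlen
      rw [List.getElem?_append_right (by omega)]
      simp
    · rw [nextOf_split hnp]
      rfl

-- ==== dict lemmas ====

lemma dict_get?_erase {ν : Type} (d : PySem.Dict String ν) (k j : String) :
    (d.erase k).get? j = if j = k then none else d.get? j := by
  obtain ⟨items⟩ := d
  simp only [PySem.Dict.erase, PySem.Dict.get?]
  induction items with
  | nil => simp
  | cons p t ih =>
    by_cases h1 : p.1 = k
    · rw [List.filter_cons_of_neg (by simp [h1])]
      rw [ih]
      by_cases h2 : j = k
      · simp [h2]
      · rw [if_neg h2, if_neg h2,
           List.find?_cons_of_neg (by simp [h1]; exact fun hc => h2 hc.symm)]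
    · rw [List.filter_cons_of_pos (by simp [h1])]
      by_cases h3 : p.1 = j
      · rw [List.find?_cons_of_pos (by simp [h3]), List.find?_cons_of_pos (by simp [h3])]
        rw [if_neg (fun hc => h1 (h3.trans hc))]
      · rw [List.find?_cons_of_neg (by simp [h3]), List.find?_cons_of_neg (by simp [h3])]
        exact ih

lemma dict_contains_iff {ν : Type} (d : PySem.Dict String ν) (k : String) :
    d.contains k = true ↔ (d.get? k).isSome := by
  rw [PySem.Dict.contains_eq_isSome_get?]

lemma dict_contains_insert {ν : Type} (d : PySem.Dict String ν) (k j : String) (v : ν) :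
    (d.insert k v).contains j = true ↔ j = k ∨ d.contains j = true := by
  rw [dict_contains_iff, dict_contains_iff, PySem.Dict.get?_insert]
  by_cases h : j = k <;> simp [h]

lemma dict_contains_erase {ν : Type} (d : PySem.Dict String ν) (k j : String) :
    (d.erase k).contains j = true ↔ j ≠ k ∧ d.contains j = true := by
  rw [dict_contains_iff, dict_contains_iff, dict_get?_erase]
  by_cases h : j = k <;> simp [h]

-- ==== the simulation invariant ====

def SimInv (values : PySem.Dict String String) (order : List String)
    (prv nxt : PySem.Dict String (Option String)) (head tail : Option String) : Prop :=
  order.Nodup ∧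
  (∀ k, values.contains k = true ↔ k ∈ order) ∧
  head = order.head? ∧
  tail = order.getLast? ∧
  (∀ k ∈ order, prv.get? k = some (prevOf order k) ∧ nxt.get? k = some (nextOf order k))

lemma step_rel (op : String) (values : PySem.Dict String String) (order result : List String)
    (prv nxt : PySem.Dict String (Option String)) (head tail : Option String)
    (hInv : SimInv values order prv nxt head tail) :
    ∃ prv' nxt' head' tail',
      stepB (values, prv, nxt, head, tail, result) op =
        ((stepA (values, order, result) op).1, prv', nxt', head', tail',
          (stepA (values, order, result) op).2.2) ∧
      SimInv (stepA (values, order, result) op).1 (stepA (values, order, result) op).2.1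
        prv' nxt' head' tail' := by
  obtain ⟨hnd, hmem, hhead, htail, hpn⟩ := hInv
  subst hhead htail
  simp only [stepA, stepB]
  by_cases hc1 : ((PySem.List.pyGet? (PySem.Str.split₀ op) 0).getD "") = "put"
  · -- PUT
    simp only [if_pos hc1]
    by_cases hc : values.contains ((PySem.List.pyGet? (PySem.Str.split₀ op) 1).getD "") = true
    · -- existing key: order unchanged
      simp only [if_pos hc]
      refine ⟨prv, nxt, order.head?, order.getLast?, rfl, hnd, ?_, rfl, rfl, hpn⟩
      intro j
      rw [dict_contains_insert]
      constructor
      · rintro (rfl | hj)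
        · exact (hmem _).1 hc
        · exact (hmem _).1 hj
      · intro hj; exact Or.inr ((hmem _).2 hj)
    · -- new key: append at the tail
      simp only [if_neg hc]
      have hkey : ((PySem.List.pyGet? (PySem.Str.split₀ op) 1).getD "") ∉ order := by
        intro hmem'
        exact hc ((hmem _).2 hmem')
      set key := ((PySem.List.pyGet? (PySem.Str.split₀ op) 1).getD "") with hkeydef
      have hmem' : ∀ j, ((values.insert key ((PySem.List.pyGet? (PySem.Str.split₀ op) 2).getD "")).contains j = true) ↔ j ∈ order ++ [key] := by
        intro j
        rw [dict_contains_insert]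
        simp only [List.mem_append, List.mem_singleton]
        constructor
        · rintro (rfl | hj)
          · exact Or.inr rfl
          · exact Or.inl ((hmem _).1 hj)
        · rintro (hj | rfl)
          · exact Or.inr ((hmem _).2 hj)
          · exact Or.inl rfl
      have hnd' : (order ++ [key]).Nodup := by
        rw [List.nodup_append]
        refine ⟨hnd, List.nodup_singleton _, ?_⟩
        intro a ha b hb
        rw [List.mem_singleton] at hb
        subst hb
        exact fun h => hkey (h ▸ ha)
      cases ho : order.getLast? with
      | none =>
        have hord : order = [] := by
          cases order with
          | nil => rfl
          | cons a t => rw [List.getLast?_eq_none_iff] at ho; simp at ho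
        subst hord
        refine ⟨prv.insert key none, nxt.insert key none, some key, some key, rfl,
          hnd', hmem', by simp, by simp, ?_⟩
        intro j hj
        simp only [List.nil_append, List.mem_singleton] at hj
        subst hj
        constructor
        · rw [PySem.Dict.get?_insert_self]
          simp [prevOf]
        · rw [PySem.Dict.get?_insert_self]
          simp [nextOf]
      | some t =>
        have htmem : t ∈ order := List.mem_of_getLast? ho
        have hone : order ≠ [] := by intro h; subst h; simp at htmem
        have htk : t ≠ key := fun h => hkey (h ▸ htmem)
        refine ⟨prv.insert key (some t), (nxt.insert key none).insert t (some key),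
          order.head?, some key, rfl, hnd', hmem', ?_, ?_, ?_⟩
        · cases order with
          | nil => simp at htmem
          | cons a rest => simp
        · rw [List.getLast?_concat]
        · intro j hj
          rw [List.mem_append, List.mem_singleton] at hj
          rcases hj with hj | rfl
          · have hjk : j ≠ key := fun h => hkey (h ▸ hj)
            constructor
            · rw [PySem.Dict.get?_insert_of_ne _ _ hjk, (hpn j hj).1,
                 prevOf_append_of_ne hjk]
            · rw [nextOf_append_mem hnd hj, ho]
              by_cases hjt : j = t
              · subst hjt
                rw [PySem.Dict.get?_insert_self]
                simp
              · rw [PySem.Dict.get?_insert_of_ne _ _ hjt,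
                   PySem.Dict.get?_insert_of_ne _ _ hjk, (hpn j hj).2]
                have : ¬ (some t = some j) := by simp; exact fun h => hjt h.symm
                rw [if_neg this]
          · constructor
            · rw [PySem.Dict.get?_insert_self, prevOf_append_self hkey, ho]
            · rw [PySem.Dict.get?_insert_of_ne _ _ (Ne.symm htk),
                 PySem.Dict.get?_insert_self, nextOf_append_self hkey]
  · simp only [if_neg hc1]
    by_cases hc2 : ((PySem.List.pyGet? (PySem.Str.split₀ op) 0).getD "") = "get"
    · -- GET
      simp only [if_pos hc2]
      exact ⟨prv, nxt, order.head?, order.getLast?, rfl, hnd, hmem, rfl, rfl, hpn⟩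
    · simp only [if_neg hc2]
      by_cases hc3 : ((PySem.List.pyGet? (PySem.Str.split₀ op) 0).getD "") = "prev"
      · -- PREV
        simp only [if_pos hc3]
        by_cases hc : values.contains ((PySem.List.pyGet? (PySem.Str.split₀ op) 1).getD "") = true
        · simp only [if_pos hc]
          set key := ((PySem.List.pyGet? (PySem.Str.split₀ op) 1).getD "") with hkeydef
          have hkmem : key ∈ order := (hmem _).1 hc
          obtain ⟨i, hi⟩ : ∃ i, PySem.List.index? order key = some i := by
            have := (PySem.List.index?_isSome_iff (xs := order) (v := key)).2 hkmem
            exact Option.isSome_iff_exists.1 this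
          have hgetD : prv.getD key none = prevOf order key :=
            PySem.Dict.getD_of_get?_eq_some _ _ (hpn key hkmem).1
          rw [hi, hgetD]
          simp only [Option.getD_some]
          by_cases hi0 : i = 0
          · subst hi0
            rw [index?_zero_prevOf hnd hi]
            simp only [reduceIte]
            exact ⟨prv, nxt, order.head?, order.getLast?, rfl, hnd, hmem, rfl, rfl, hpn⟩
          · obtain ⟨q, hq1, hq2⟩ := index?_pos_prevOf hnd hi hi0
            rw [hq2, hq1]
            simp only [if_neg hi0, Option.getD_some]
            exact ⟨prv, nxt, order.head?, order.getLast?, rfl, hnd, hmem, rfl, rfl, hpn⟩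
        · simp only [if_neg hc]
          exact ⟨prv, nxt, order.head?, order.getLast?, rfl, hnd, hmem, rfl, rfl, hpn⟩
      · simp only [if_neg hc3]
        by_cases hc4 : ((PySem.List.pyGet? (PySem.Str.split₀ op) 0).getD "") = "next"
        · -- NEXT
          simp only [if_pos hc4]
          by_cases hc : values.contains ((PySem.List.pyGet? (PySem.Str.split₀ op) 1).getD "") = true
          · simp only [if_pos hc]
            set key := ((PySem.List.pyGet? (PySem.Str.split₀ op) 1).getD "") with hkeydef
            have hkmem : key ∈ order := (hmem _).1 hc
            obtain ⟨i, hi⟩ : ∃ i, PySem.List.index? order key = some i := by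
              have := (PySem.List.index?_isSome_iff (xs := order) (v := key)).2 hkmem
              exact Option.isSome_iff_exists.1 this
            have hgetD : nxt.getD key none = nextOf order key :=
              PySem.Dict.getD_of_get?_eq_some _ _ (hpn key hkmem).2
            rw [hi, hgetD]
            simp only [Option.getD_some]
            by_cases hil : (i : Int) = (order.length : Int) - 1
            · rw [index?_last_nextOf hi hil]
              simp only [if_pos hil]
              exact ⟨prv, nxt, order.head?, order.getLast?, rfl, hnd, hmem, rfl, rfl, hpn⟩
            · obtain ⟨q, hq1, hq2⟩ := index?_mid_nextOf hi hil
              rw [hq2, hq1]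
              simp only [if_neg hil, Option.getD_some]
              exact ⟨prv, nxt, order.head?, order.getLast?, rfl, hnd, hmem, rfl, rfl, hpn⟩
          · simp only [if_neg hc]
            exact ⟨prv, nxt, order.head?, order.getLast?, rfl, hnd, hmem, rfl, rfl, hpn⟩
        · simp only [if_neg hc4]
          by_cases hc5 : ((PySem.List.pyGet? (PySem.Str.split₀ op) 0).getD "") = "delete"
          · -- DELETE
            simp only [if_pos hc5]
            by_cases hc : values.contains ((PySem.List.pyGet? (PySem.Str.split₀ op) 1).getD "") = true
            · simp only [if_pos hc]
              set key := ((PySem.List.pyGet? (PySem.Str.split₀ op) 1).getD "") with hkeydef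
              have hkmem : key ∈ order := (hmem _).1 hc
              have hrm : (PySem.List.remove? order key).getD order = order.erase key := by
                rw [PySem.List.remove?_eq_some_erase order _ hkmem]
                rfl
              rw [hrm]
              have hp : prv.getD key none = prevOf order key :=
                PySem.Dict.getD_of_get?_eq_some _ _ (hpn key hkmem).1
              have hn : nxt.getD key none = nextOf order key :=
                PySem.Dict.getD_of_get?_eq_some _ _ (hpn key hkmem).2
              rw [hp, hn]
              have hnd' : (order.erase key).Nodup := hnd.erase key
              have hmem2 : ∀ j, ((values.erase key).contains j = true) ↔ j ∈ order.erase key := by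
                intro j
                rw [dict_contains_erase, hnd.mem_erase_iff]
                constructor
                · rintro ⟨h1, h2⟩; exact ⟨h1, (hmem _).1 h2⟩
                · rintro ⟨h1, h2⟩; exact ⟨h1, (hmem _).2 h2⟩
              refine ⟨_, _, _, _, rfl, hnd', hmem2, ?_, ?_, ?_⟩
              · -- head component
                cases hpv : prevOf order key with
                | none =>
                  rw [head?_erase hkmem, if_pos ((prevOf_eq_none_iff hnd hkmem).1 hpv)]
                | some pp =>
                  have h1 : order.head? ≠ some key := by
                    intro h
                    have := (prevOf_eq_none_iff hnd hkmem).2 h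
                    rw [hpv] at this; simp at this
                  rw [head?_erase hkmem, if_neg h1]
              · -- tail component
                cases hnv : nextOf order key with
                | none =>
                  rw [getLast?_erase hnd hkmem, if_pos ((nextOf_eq_none_iff hnd hkmem).1 hnv)]
                | some nn =>
                  have h1 : order.getLast? ≠ some key := by
                    intro h
                    have := (nextOf_eq_none_iff hnd hkmem).2 h
                    rw [hnv] at this; simp at this
                  rw [getLast?_erase hnd hkmem, if_neg h1]
              · intro j hj
                have hjne : j ≠ key := (hnd.mem_erase_iff.1 hj).1
                have hjmem : j ∈ order := (hnd.mem_erase_iff.1 hj).2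
                constructor
                · -- prv component
                  rw [prevOf_erase hnd hkmem hjmem hjne]
                  cases hnv : nextOf order key with
                  | none =>
                    have hne : prevOf order j ≠ some key := by
                      intro h
                      have := (nextOf_eq_some_iff_prevOf hnd).2 h
                      rw [hnv] at this; simp at this
                    rw [if_neg hne]
                    rw [dict_get?_erase, if_neg hjne]
                    exact (hpn j hjmem).1
                  | some nn =>
                    by_cases hjn : j = nn
                    · subst hjn
                      rw [PySem.Dict.get?_insert_self]
                      have : prevOf order j = some key := (nextOf_eq_some_iff_prevOf hnd).1 hnv
                      rw [if_pos this]
                    · rw [PySem.Dict.get?_insert_of_ne _ _ hjn, dict_get?_erase, if_neg hjne]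
                      have hne : prevOf order j ≠ some key := by
                        intro h
                        have := (nextOf_eq_some_iff_prevOf hnd).2 h
                        rw [hnv] at this
                        simp at this
                        exact hjn this.symm
                      rw [if_neg hne]
                      exact (hpn j hjmem).1
                · -- nxt component
                  rw [nextOf_erase hnd hkmem hjmem hjne]
                  cases hpv : prevOf order key with
                  | none =>
                    have hne : nextOf order j ≠ some key := by
                      intro h
                      have := (nextOf_eq_some_iff_prevOf hnd).1 h
                      rw [hpv] at this; simp at this
                    rw [if_neg hne]
                    rw [dict_get?_erase, if_neg hjne]
                    exact (hpn j hjmem).2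
                  | some pp =>
                    by_cases hjp : j = pp
                    · subst hjp
                      rw [PySem.Dict.get?_insert_self]
                      have : nextOf order j = some key := (nextOf_eq_some_iff_prevOf hnd).2 hpv
                      rw [if_pos this]
                    · rw [PySem.Dict.get?_insert_of_ne _ _ hjp, dict_get?_erase, if_neg hjne]
                      have hne : nextOf order j ≠ some key := by
                        intro h
                        have := (nextOf_eq_some_iff_prevOf hnd).1 h
                        rw [hpv] at this
                        simp at this
                        exact hjp this.symm
                      rw [if_neg hne]
                      exact (hpn j hjmem).2
            · simp only [if_neg hc]
              exact ⟨prv, nxt, order.head?, order.getLast?, rfl, hnd, hmem, rfl, rfl, hpn⟩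
          · simp only [if_neg hc5]
            exact ⟨prv, nxt, order.head?, order.getLast?, rfl, hnd, hmem, rfl, rfl, hpn⟩

lemma fold_rel (ops : List String) :
    ∀ (values : PySem.Dict String String) (order result : List String)
      (prv nxt : PySem.Dict String (Option String)) (head tail : Option String),
      SimInv values order prv nxt head tail →
      ∃ prv' nxt' head' tail',
        ops.foldl stepB (values, prv, nxt, head, tail, result) =
          ((ops.foldl stepA (values, order, result)).1, prv', nxt', head', tail',
            (ops.foldl stepA (values, order, result)).2.2) ∧
        SimInv (ops.foldl stepA (values, order, result)).1
          (ops.foldl stepA (values, order, result)).2.1 prv' nxt' head' tail' := by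
  induction ops with
  | nil =>
    intro values order result prv nxt head tail hInv
    exact ⟨prv, nxt, head, tail, rfl, hInv⟩
  | cons op ops ih =>
    intro values order result prv nxt head tail hInv
    obtain ⟨prv', nxt', head', tail', heq, hInv'⟩ :=
      step_rel op values order result prv nxt head tail hInv
    simp only [List.foldl_cons, heq]
    have := ih (stepA (values, order, result) op).1 (stepA (values, order, result) op).2.1
      (stepA (values, order, result) op).2.2 prv' nxt' head' tail' hInv'
    simpa using this

-- ===== VERDICT (by name: the statement is the Claim_ definition above) =====
theorem process_operations_spec : Claim_equal_process_operations := by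
  intro operations _ _
  unfold Spec_process_operations process_operations process_operations_alt
  have hInv : SimInv PySem.Dict.empty [] PySem.Dict.empty PySem.Dict.empty none none := by
    refine ⟨List.nodup_nil, ?_, rfl, rfl, ?_⟩
    · intro k; simp [PySem.Dict.contains_empty]
    · intro k hk; simp at hk
  obtain ⟨prv', nxt', head', tail', heq, _⟩ :=
    fold_rel operations PySem.Dict.empty [] [] PySem.Dict.empty PySem.Dict.empty none none hInv
  rw [heq]
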